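-- pv_equiv track=rewrite | github.com/sanlee42/x | skill/scripts/x_state_common.py | upsert_line_after
-- ===== SOURCE A (Python) =====
-- def upsert_line_after(text: str, prefix: str, value: str, after_prefix: str) -> str:
--     replacement = f"{prefix}{value}"
--     lines = text.splitlines()
--     for index, line in enumerate(lines):
--         if line.startswith(prefix):
--             lines[index] = replacement
--             return "\n".join(lines) + "\n"
--     for index, line in enumerate(lines):
--         if line.startswith(after_prefix):
--             lines.insert(index + 1, replacement)
--             return "\n".join(lines) + "\n"
--     lines.insert(1, replacement)
--     return "\n".join(lines) + "\n"
-- ===== SOURCE B (Python) =====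
-- def upsert_line_after(text: str, prefix: str, value: str, after_prefix: str) -> str:
--     lines = text.splitlines()
--     p_idx = None
--     a_idx = None
--     for i, line in enumerate(lines):
--         if line.startswith(prefix):
--             p_idx = i
--             break
--         if a_idx is None and line.startswith(after_prefix):
--             a_idx = i
--     replacement = prefix + value
--     if p_idx is not None:
--         lines[p_idx] = replacement
--     elif a_idx is not None:
--         lines.insert(a_idx + 1, replacement)
--     else:
--         lines.insert(1, replacement)
--     return "\n".join(lines) + "\n"
-- ===== Notes on version B (the rewrite author's own statement) =====
-- stated objective: alternative
-- what changed: A's two sequential scans (replace-scan, then insert-after-scan) are merged into one pass that records the first prefix index (breaking there) and the first after_prefix index, with the replace/insert decision made once after the scan.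
import Mathlib
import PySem

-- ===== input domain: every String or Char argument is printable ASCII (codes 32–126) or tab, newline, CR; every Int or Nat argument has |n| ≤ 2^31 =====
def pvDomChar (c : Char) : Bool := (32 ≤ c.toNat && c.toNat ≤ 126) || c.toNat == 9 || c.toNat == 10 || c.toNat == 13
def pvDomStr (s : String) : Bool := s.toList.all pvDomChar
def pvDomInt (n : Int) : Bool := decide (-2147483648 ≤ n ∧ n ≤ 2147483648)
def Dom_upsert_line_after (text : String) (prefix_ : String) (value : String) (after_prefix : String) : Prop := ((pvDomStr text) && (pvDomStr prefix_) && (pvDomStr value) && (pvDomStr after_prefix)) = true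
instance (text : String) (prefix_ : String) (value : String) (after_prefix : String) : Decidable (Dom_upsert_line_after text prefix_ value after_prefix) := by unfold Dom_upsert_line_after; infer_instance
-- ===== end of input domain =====

-- B replaces A's two sequential scans by a single pass that records the first prefix
-- and first after_prefix indices, deciding replace/insert once afterwards (alternative
-- decomposition, same cost).

-- ===== PORT A =====
-- first loop of A: replace the first line starting with prefix
def aLoop1 (p repl : String) : List String → Option (List String)
  | [] => none
  | l :: t =>
    if PySem.Str.startswith l p then some (repl :: t)
    else (aLoop1 p repl t).map (l :: ·)

-- second loop of A: insert repl right after the first line starting with after_prefix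
def aLoop2 (ap repl : String) : List String → Option (List String)
  | [] => none
  | l :: t =>
    if PySem.Str.startswith l ap then some (l :: repl :: t)
    else (aLoop2 ap repl t).map (l :: ·)

def upsert_line_after (text : String) (prefix_ : String) (value : String) (after_prefix : String) : String :=
  let replacement := prefix_ ++ value
  let lines := PySem.Str.splitlines text
  match aLoop1 prefix_ replacement lines with
  | some ls => PySem.Str.join "\n" ls ++ "\n"
  | none =>
    match aLoop2 after_prefix replacement lines with
    | some ls => PySem.Str.join "\n" ls ++ "\n"
    | none => PySem.Str.join "\n" (PySem.List.insert lines (1 : Int) replacement) ++ "\n"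

-- ===== PORT B =====
-- B's single pass: first index starting with p (break there) and first index starting with ap
def bScan (p ap : String) : List String → Nat → Option Nat → Option Nat × Option Nat
  | [], _, aIdx => (none, aIdx)
  | l :: t, i, aIdx =>
    if PySem.Str.startswith l p then (some i, aIdx)
    else bScan p ap t (i + 1)
      (if aIdx.isNone && PySem.Str.startswith l ap then some i else aIdx)

def upsert_line_after_alt (text : String) (prefix_ : String) (value : String) (after_prefix : String) : String :=
  let lines := PySem.Str.splitlines text
  let r := bScan prefix_ after_prefix lines 0 none
  let replacement := prefix_ ++ value
  let lines' :=
    match r.1 with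
    | some i => lines.set i replacement
    | none =>
      match r.2 with
      | some a => PySem.List.insert lines ((a + 1 : Nat) : Int) replacement
      | none => PySem.List.insert lines (1 : Int) replacement
  PySem.Str.join "\n" lines' ++ "\n"

-- ===== PRECONDITION & SPEC =====
def Spec_upsert_line_after (text : String) (prefix_ : String) (value : String) (after_prefix : String) (out : String) : Prop := out = upsert_line_after_alt text prefix_ value after_prefix
instance (text : String) (prefix_ : String) (value : String) (after_prefix : String) (out : String) : Decidable (Spec_upsert_line_after text prefix_ value after_prefix out) := by unfold Spec_upsert_line_after; infer_instance

-- ===== CLAIM (what is proved, stated in full; the proofs are below) =====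
def Claim_equal_upsert_line_after : Prop := ∀ (text : String) (prefix_ : String) (value : String) (after_prefix : String), Dom_upsert_line_after text prefix_ value after_prefix → Spec_upsert_line_after text prefix_ value after_prefix (upsert_line_after text prefix_ value after_prefix)

-- ===== LEMMAS AND PROOFS =====

theorem aLoop1_eq (p repl : String) (ls : List String) :
    aLoop1 p repl ls
      = (ls.findIdx? (fun l => PySem.Str.startswith l p)).map (fun j => ls.set j repl) := by
  induction ls with
  | nil => simp [aLoop1]
  | cons l t ih =>
    by_cases h : PySem.Chars.startswith l.toList p.toList = true
    · simp [aLoop1, h, List.findIdx?_cons]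
    · simp only [aLoop1, List.findIdx?_cons, ih, PySem.Str.startswith_eq, h,
        Bool.false_eq_true, if_false]
      cases t.findIdx? (fun l => PySem.Chars.startswith l.toList p.toList) <;> simp

theorem aLoop2_eq (ap repl : String) (ls : List String) :
    aLoop2 ap repl ls
      = (ls.findIdx? (fun l => PySem.Str.startswith l ap)).map
          (fun j => ls.take (j + 1) ++ repl :: ls.drop (j + 1)) := by
  induction ls with
  | nil => simp [aLoop2]
  | cons l t ih =>
    by_cases h : PySem.Chars.startswith l.toList ap.toList = true
    · simp [aLoop2, h, List.findIdx?_cons]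
    · simp only [aLoop2, List.findIdx?_cons, ih, PySem.Str.startswith_eq, h,
        Bool.false_eq_true, if_false]
      cases t.findIdx? (fun l => PySem.Chars.startswith l.toList ap.toList) <;> simp

theorem bScan_fst (p ap : String) (ls : List String) (i : Nat) (acc : Option Nat) :
    (bScan p ap ls i acc).1
      = (ls.findIdx? (fun l => PySem.Str.startswith l p)).map (fun j => i + j) := by
  induction ls generalizing i acc with
  | nil => simp [bScan]
  | cons l t ih =>
    by_cases h : PySem.Chars.startswith l.toList p.toList = true
    · simp [bScan, h, List.findIdx?_cons]
    · simp only [bScan, List.findIdx?_cons, ih, PySem.Str.startswith_eq, h,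
        Bool.false_eq_true, if_false]
      cases t.findIdx? (fun l => PySem.Chars.startswith l.toList p.toList) with
      | none => simp
      | some k => simp; omega

theorem bScan_snd (p ap : String) (ls : List String) (i : Nat) (acc : Option Nat)
    (hnone : ls.findIdx? (fun l => PySem.Str.startswith l p) = none) :
    (bScan p ap ls i acc).2
      = acc.or ((ls.findIdx? (fun l => PySem.Str.startswith l ap)).map (fun j => i + j)) := by
  induction ls generalizing i acc with
  | nil => simp [bScan]
  | cons l t ih =>
    rw [List.findIdx?_cons] at hnone
    by_cases h : PySem.Chars.startswith l.toList p.toList = true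
    · simp [h] at hnone
    · simp only [PySem.Str.startswith_eq, h, Bool.false_eq_true, if_false] at hnone
      have ht : t.findIdx? (fun l => PySem.Str.startswith l p) = none := by
        simpa using hnone
      simp only [bScan, PySem.Str.startswith_eq, h, Bool.false_eq_true, if_false, ih _ _ ht]
      rw [List.findIdx?_cons]
      by_cases ha : PySem.Chars.startswith l.toList ap.toList = true
      · cases acc <;> simp [ha]
      · rw [Bool.not_eq_true] at ha
        simp only [PySem.Str.startswith_eq, ha, Bool.false_eq_true, if_false, Bool.and_false,
          Option.or_none]
        cases acc with
        | some a => simp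
        | none =>
          cases t.findIdx? (fun l => PySem.Chars.startswith l.toList ap.toList) with
          | none => simp
          | some k => simp; omega

theorem findIdx?_lt_length {α : Type} (q : α → Bool) (ls : List α) (j : Nat)
    (h : ls.findIdx? q = some j) : j < ls.length := by
  induction ls generalizing j with
  | nil => simp at h
  | cons l t ih =>
    rw [List.findIdx?_cons] at h
    by_cases hq : q l = true
    · simp [hq] at h; simp only [List.length_cons]; omega
    · simp only [hq, Bool.false_eq_true, if_false] at h
      cases hx : t.findIdx? q with
      | none => simp [hx] at h
      | some k =>
        simp [hx] at h
        have := ih k hx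
        simp only [List.length_cons]
        omega

-- ===== VERDICT (by name: the statement is the Claim_ definition above) =====
theorem upsert_line_after_spec : Claim_equal_upsert_line_after := by
  intro text prefix_ value after_prefix _
  unfold Spec_upsert_line_after upsert_line_after upsert_line_after_alt
  set ls := PySem.Str.splitlines text with hls
  simp only [aLoop1_eq, aLoop2_eq, bScan_fst]
  cases hp : ls.findIdx? (fun l => PySem.Str.startswith l prefix_) with
  | some j => simp [hp]
  | none =>
    have h2 := bScan_snd prefix_ after_prefix ls 0 none hp
    cases ha : ls.findIdx? (fun l => PySem.Str.startswith l after_prefix) with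
    | none =>
      rw [ha] at h2
      simp only [hp, ha, Option.map_none, h2, Option.none_or]
    | some a =>
      have hlt : a < ls.length := findIdx?_lt_length _ _ _ ha
      rw [ha] at h2
      simp only [hp, ha, Option.map_none, Option.map_some, h2, Option.none_or, Nat.zero_add]
      rw [PySem.List.insert_natCast _ (a + 1) _ (by omega)]
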